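-- pv_equiv track=rewrite | github.com/CometAve/Algorithm_Problem_Solving | Python/SWEA/D2/9490. 풍선팡/풍선팡.py | get_max_flowers
-- ===== SOURCE A (Python) =====
-- def get_max_flowers(i, j, N, M, balloons):
--   x, y = i, j
--   dx = [0, 1, 0, -1]
--   dy = [1, 0, -1, 0]
--   current_flowers = balloons[i][j]
--   total_flowers = current_flowers
--
--   for i in range(4):
--     for flower in range(1, current_flowers+1):
--       nx, ny = x + dx[i] * flower, y + dy[i] * flower
--       if 0 <= nx < N and 0 <= ny < M:
--         total_flowers += balloons[nx][ny]
--   return total_flowers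
-- ===== SOURCE B (Python) =====
-- def get_max_flowers(i, j, N, M, balloons):
--     k = balloons[i][j]
--     total = k
--     for r, row in enumerate(balloons):
--         for c, v in enumerate(row):
--             if r < N and c < M and ((r == i and c != j and abs(c - j) <= k)
--                                     or (c == j and r != i and abs(r - i) <= k)):
--                 total += v
--     return total
-- ===== Notes on version B (the rewrite author's own statement) =====
-- stated objective: alternative
-- what changed: Instead of walking four rays of length k from (i,j) with a per-step bounds check, B scans the whole grid once with enumerate and adds each cell whose coordinates satisfy a closed cross-membership predicate (same row/column, distance at most k, inside the N x M window).
import Mathlib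
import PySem

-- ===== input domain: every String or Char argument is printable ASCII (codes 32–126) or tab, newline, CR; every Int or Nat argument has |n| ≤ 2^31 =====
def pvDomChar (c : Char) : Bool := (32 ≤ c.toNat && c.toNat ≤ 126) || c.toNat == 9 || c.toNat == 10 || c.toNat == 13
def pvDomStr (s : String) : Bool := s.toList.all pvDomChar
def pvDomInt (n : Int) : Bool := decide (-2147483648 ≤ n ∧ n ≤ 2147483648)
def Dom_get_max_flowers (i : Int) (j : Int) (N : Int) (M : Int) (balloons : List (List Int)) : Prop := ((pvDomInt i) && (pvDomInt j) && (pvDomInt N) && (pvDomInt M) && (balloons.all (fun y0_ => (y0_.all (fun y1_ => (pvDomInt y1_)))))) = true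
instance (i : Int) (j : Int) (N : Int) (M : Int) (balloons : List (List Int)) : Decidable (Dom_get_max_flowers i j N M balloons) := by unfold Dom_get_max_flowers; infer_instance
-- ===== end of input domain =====

-- B replaces A's four ray walks from (i,j) by a single scan of the whole stored grid with a closed cross-membership predicate: a different traversal of the data, similar cost on contest-sized grids.


-- ===== PORT A =====
-- literal transliteration of A; pyGetD's default is unreachable under Pre_ (all indexed accesses are in range there)
def get_max_flowers (i : Int) (j : Int) (N : Int) (M : Int) (balloons : List (List Int)) : Int :=
  let x := i
  let y := j
  let dx : List Int := [0, 1, 0, -1]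
  let dy : List Int := [1, 0, -1, 0]
  let current_flowers := PySem.List.pyGetD (PySem.List.pyGetD balloons i []) j 0
  let total_flowers := current_flowers
  (PySem.List.pyRange 0 4 1).foldl (fun tot d =>
    (PySem.List.pyRange 1 (current_flowers + 1) 1).foldl (fun tot flower =>
      let nx := x + PySem.List.pyGetD dx d 0 * flower
      let ny := y + PySem.List.pyGetD dy d 0 * flower
      if 0 ≤ nx ∧ nx < N ∧ 0 ≤ ny ∧ ny < M then
        tot + PySem.List.pyGetD (PySem.List.pyGetD balloons nx []) ny 0
      else tot) tot) total_flowers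

-- ===== PORT B =====
-- literal transliteration of B (Source B): one scan of the stored grid via enumerate, adding each
-- cell that satisfies the cross-membership predicate; the only raw indexing is the centre read
def get_max_flowers_alt (i : Int) (j : Int) (N : Int) (M : Int) (balloons : List (List Int)) : Int :=
  let k := PySem.List.pyGetD (PySem.List.pyGetD balloons i []) j 0
  let total := k
  (PySem.List.enumerate balloons).foldl (fun total p =>
    (PySem.List.enumerate p.2).foldl (fun total q =>
      if p.1 < N ∧ q.1 < M ∧ ((p.1 = i ∧ q.1 ≠ j ∧ |q.1 - j| ≤ k) ∨ (q.1 = j ∧ p.1 ≠ i ∧ |p.1 - i| ≤ k))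
      then total + q.2 else total) total) total

-- ===== PRECONDITION & SPEC =====
-- Pre_ is exactly the closed-form condition under which the Python A returns normally: the start cell
-- (i, j) is a valid (possibly negative) Python index, and every guarded ray cell the loop would read
-- (nonnegative indices inside the N/M window) actually exists; outside it A raises IndexError.
def Pre_get_max_flowers (i : Int) (j : Int) (N : Int) (M : Int) (balloons : List (List Int)) : Prop :=
  (-(balloons.length : Int) ≤ i ∧ i < (balloons.length : Int)) ∧
  (-(((PySem.List.pyGetD balloons i []).length : Nat) : Int) ≤ j ∧ j < (((PySem.List.pyGetD balloons i []).length : Nat) : Int)) ∧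
  ((0 ≤ i ∧ i < N) →
     (∀ t ∈ PySem.List.pyRange (max (j + 1) 0) (min (j + PySem.List.pyGetD (PySem.List.pyGetD balloons i []) j 0 + 1) M) 1,
        t < (((PySem.List.pyGetD balloons i []).length : Nat) : Int)) ∧
     (∀ t ∈ PySem.List.pyRange (max (j - PySem.List.pyGetD (PySem.List.pyGetD balloons i []) j 0) 0) (min j M) 1,
        t < (((PySem.List.pyGetD balloons i []).length : Nat) : Int))) ∧
  ((0 ≤ j ∧ j < M) →
     (∀ t ∈ PySem.List.pyRange (max (i + 1) 0) (min (i + PySem.List.pyGetD (PySem.List.pyGetD balloons i []) j 0 + 1) N) 1,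
        t < (balloons.length : Int) ∧ j < (((PySem.List.pyGetD balloons t []).length : Nat) : Int)) ∧
     (∀ t ∈ PySem.List.pyRange (max (i - PySem.List.pyGetD (PySem.List.pyGetD balloons i []) j 0) 0) (min i N) 1,
        t < (balloons.length : Int) ∧ j < (((PySem.List.pyGetD balloons t []).length : Nat) : Int)))
instance (i : Int) (j : Int) (N : Int) (M : Int) (balloons : List (List Int)) : Decidable (Pre_get_max_flowers i j N M balloons) := by unfold Pre_get_max_flowers; infer_instance
def pvWitness_get_max_flowers : Int × Int × Int × Int × List (List Int) := (0, 0, 1, 1, [[3]])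

def Spec_get_max_flowers (i : Int) (j : Int) (N : Int) (M : Int) (balloons : List (List Int)) (out : Int) : Prop := out = get_max_flowers_alt i j N M balloons
instance (i : Int) (j : Int) (N : Int) (M : Int) (balloons : List (List Int)) (out : Int) : Decidable (Spec_get_max_flowers i j N M balloons out) := by unfold Spec_get_max_flowers; infer_instance

-- ===== CLAIM (what is proved, stated in full; the proofs are below) =====
def Claim_equal_get_max_flowers : Prop := ∀ (i : Int) (j : Int) (N : Int) (M : Int) (balloons : List (List Int)), Dom_get_max_flowers i j N M balloons → Pre_get_max_flowers i j N M balloons → Spec_get_max_flowers i j N M balloons (get_max_flowers i j N M balloons)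

-- ===== LEMMAS AND PROOFS =====

-- a loop that never changes its accumulator returns its initial value
theorem pv_foldl_id (l : List Int) (init : Int) :
    l.foldl (fun t (_ : Int) => t) init = init := by
  induction l generalizing init with
  | nil => rfl
  | cons a l ih => simp only [List.foldl_cons, ih]

-- a guarded accumulating loop is its initial value plus a sum of guarded terms
theorem pv_foldl_guard_sum {α : Type} (P : α → Prop) [DecidablePred P] (v : α → Int) (l : List α) (init : Int) :
    l.foldl (fun t a => if P a then t + v a else t) init
      = init + (l.map (fun a => if P a then v a else 0)).sum := by
  induction l generalizing init with
  | nil => simp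
  | cons a l ih =>
      simp only [List.foldl_cons, List.map_cons, List.sum_cons, ih]
      by_cases h : P a
      · simp [h]; ring
      · simp [h]

-- a guarded accumulating loop over Int elements (specialisation used by the A side)
theorem pv_foldl_guard2_sum (lo hi : Int) (v : Int → Int) (l : List Int) (init : Int) :
    l.foldl (fun t f => if lo ≤ f ∧ f < hi then t + v f else t) init
      = init + (l.map (fun f => if lo ≤ f ∧ f < hi then v f else 0)).sum :=
  pv_foldl_guard_sum (fun f => lo ≤ f ∧ f < hi) v l init

-- an upper guard over an ascending range clamps the upper bound
theorem pv_sum_guard_clamp (a b m : Int) (v : Int → Int) :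
    ((PySem.List.pyRange a b 1).map (fun f => if f < m then v f else 0)).sum
      = ((PySem.List.pyRange a (min b m) 1).map v).sum := by
  by_cases h : b ≤ a
  · rw [PySem.List.pyRange_one_eq_nil h, PySem.List.pyRange_one_eq_nil (by omega)]
    simp
  · by_cases hm : m ≤ a
    · rw [PySem.List.pyRange_one_eq_nil (b := min b m) (by omega)]
      rw [List.map_congr_left (g := fun _ => (0:Int)) (by
        intro f hf
        rw [PySem.List.mem_pyRange_one] at hf
        simp [show ¬ f < m by omega])]
      simp
    · rw [PySem.List.pyRange_one_append a (min b m) b (by omega) (by omega)]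
      rw [List.map_append, List.sum_append]
      rw [List.map_congr_left (l := PySem.List.pyRange a (min b m) 1) (g := v) (by
        intro f hf
        rw [PySem.List.mem_pyRange_one] at hf
        simp [show f < m by omega])]
      rw [List.map_congr_left (l := PySem.List.pyRange (min b m) b 1) (g := fun _ => (0:Int)) (by
        intro f hf
        rw [PySem.List.mem_pyRange_one] at hf
        simp [show ¬ f < m by omega])]
      simp

-- a lower guard over an ascending range clamps the lower bound
theorem pv_sum_guard_clamp_lo (a b m : Int) (v : Int → Int) :
    ((PySem.List.pyRange a b 1).map (fun f => if m ≤ f then v f else 0)).sum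
      = ((PySem.List.pyRange (max a m) b 1).map v).sum := by
  by_cases h : b ≤ a
  · rw [PySem.List.pyRange_one_eq_nil h, PySem.List.pyRange_one_eq_nil (by omega)]
    simp
  · by_cases hm : m ≤ a
    · rw [show max a m = a from by omega]
      apply congrArg
      apply List.map_congr_left
      intro f hf
      rw [PySem.List.mem_pyRange_one] at hf
      simp [show m ≤ f by omega]
    · rw [show max a m = m from by omega]
      rw [PySem.List.pyRange_one_append a (min b m) b (by omega) (by omega)]
      rw [List.map_append, List.sum_append]
      rw [List.map_congr_left (l := PySem.List.pyRange a (min b m) 1) (g := fun _ => (0:Int)) (by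
        intro f hf
        rw [PySem.List.mem_pyRange_one] at hf
        simp [show ¬ m ≤ f by omega])]
      by_cases hmb : m ≤ b
      · rw [show min b m = m from by omega]
        rw [List.map_congr_left (l := PySem.List.pyRange m b 1) (g := v) (by
          intro f hf
          rw [PySem.List.mem_pyRange_one] at hf
          simp [show m ≤ f by omega])]
        simp
      · rw [show min b m = b from by omega]
        rw [PySem.List.pyRange_one_eq_nil (a := b) (b := b) (by omega),
            PySem.List.pyRange_one_eq_nil (a := m) (b := b) (by omega)]
        simp

-- a two-sided guard clamps both bounds
theorem pv_sum_guard_clamp2 (a b lo hi : Int) (v : Int → Int) :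
    ((PySem.List.pyRange a b 1).map (fun f => if lo ≤ f ∧ f < hi then v f else 0)).sum
      = ((PySem.List.pyRange (max a lo) (min b hi) 1).map v).sum := by
  rw [List.map_congr_left (g := fun f => if lo ≤ f then (if f < hi then v f else 0) else 0) (by
    intro f _
    by_cases h1 : lo ≤ f <;> by_cases h2 : f < hi <;> simp [h1, h2])]
  rw [pv_sum_guard_clamp_lo a b lo (fun f => if f < hi then v f else 0)]
  rw [pv_sum_guard_clamp (max a lo) b hi v]

-- shifting the index of a range sum
theorem pv_sum_shift (a b d : Int) (v : Int → Int) :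
    ((PySem.List.pyRange a b 1).map (fun f => v (d + f))).sum
      = ((PySem.List.pyRange (d + a) (d + b) 1).map v).sum := by
  rw [PySem.List.pyRange_one a b, PySem.List.pyRange_one (d + a) (d + b)]
  rw [show d + b - (d + a) = b - a by ring]
  simp only [List.map_map]
  apply congrArg
  apply List.map_congr_left
  intro k _
  simp only [Function.comp]
  ring_nf

-- reflecting a Nat-range sum
theorem pv_sum_range_reflect (f : Nat → Int) (n : Nat) :
    ((List.range n).map f).sum = ((List.range n).map (fun k => f (n - 1 - k))).sum := by
  induction n with
  | zero => simp
  | succ n ih =>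
      conv_lhs => rw [List.range_succ]
      conv_rhs => rw [List.range_succ_eq_map]
      simp only [List.map_append, List.sum_append, List.map_cons, List.sum_cons, List.map_map]
      rw [ih]
      simp only [Function.comp_def]
      rw [show (fun k => f (n + 1 - 1 - (k + 1))) = (fun k => f (n - 1 - k)) from by
        funext k; congr 1; omega]
      rw [show n + 1 - 1 - 0 = n from by omega]
      simp
      ring

-- a descending ray sum equals the ascending range sum over the same cells
theorem pv_sum_reflect2 (a e p : Int) (v : Int → Int) :
    ((PySem.List.pyRange a e 1).map (fun f => v (p - f))).sum
      = ((PySem.List.pyRange (p - e + 1) (p - a + 1) 1).map v).sum := by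
  rw [PySem.List.pyRange_one a e, PySem.List.pyRange_one (p - e + 1) (p - a + 1)]
  rw [show p - a + 1 - (p - e + 1) = e - a by ring]
  simp only [List.map_map, Function.comp_def]
  conv_rhs => rw [pv_sum_range_reflect (fun k => v (p - e + 1 + (k:Int))) (e - a).toNat]
  apply congrArg
  apply List.map_congr_left
  intro k hk
  rw [List.mem_range] at hk
  congr 1
  omega

-- a clamped range whose elements Pre_ bounds below L is unchanged by further clamping at L
theorem pv_range_collapse (s U L : Int)
    (h : ∀ t ∈ PySem.List.pyRange s U 1, t < L) :
    PySem.List.pyRange s (min L U) 1 = PySem.List.pyRange s U 1 := by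
  by_cases hUL : U ≤ L
  · rw [show min L U = U from by omega]
  · have hLs : L < s := by
      by_contra hc
      have := h L (by rw [PySem.List.mem_pyRange_one]; omega)
      omega
    have hUs : U ≤ s := by
      by_contra hc
      have := h s (by rw [PySem.List.mem_pyRange_one]; omega)
      omega
    rw [PySem.List.pyRange_one_eq_nil (by omega), PySem.List.pyRange_one_eq_nil (by omega)]

-- a sum over range 0..L of a term guarded by r = i is the single term (when i is in range)
theorem pv_sum_singleton (L i : Int) (g : Int → Int) :
    ((PySem.List.pyRange 0 L 1).map (fun r => if r = i then g r else 0)).sum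
      = if 0 ≤ i ∧ i < L then g i else 0 := by
  rw [List.map_congr_left (g := fun r => if i ≤ r ∧ r < i + 1 then g r else 0) (by
    intro r _
    rw [if_congr (show r = i ↔ (i ≤ r ∧ r < i + 1) from by omega) rfl rfl])]
  rw [pv_sum_guard_clamp2]
  by_cases h : 0 ≤ i ∧ i < L
  · rw [if_pos h, show max 0 i = i from by omega, show min L (i + 1) = i + 1 from by omega]
    rw [PySem.List.pyRange_one i (i + 1), show i + 1 - i = (1:Int) from by ring]
    simp
  · rw [if_neg h, PySem.List.pyRange_one_eq_nil (by omega)]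
    simp

-- pulling a row-independent condition out of an inner sum
theorem pv_sum_if_pull {α : Type} (P : Prop) [Decidable P] (w : α → Int) (l : List α) :
    (l.map (fun a => if P then w a else 0)).sum = if P then (l.map w).sum else 0 := by
  by_cases h : P <;> simp [h]

-- the A side: the ray loops evaluate to the four clamped range sums
theorem pv_A_eq (i j N M : Int) (b : List (List Int)) :
    get_max_flowers i j N M b =
      PySem.List.pyGetD (PySem.List.pyGetD b i []) j 0
      + (if 0 ≤ i ∧ i < N then
            ((PySem.List.pyRange (max (j + 1) 0) (min (j + PySem.List.pyGetD (PySem.List.pyGetD b i []) j 0 + 1) M) 1).map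
              (fun ny => PySem.List.pyGetD (PySem.List.pyGetD b i []) ny 0)).sum
          + ((PySem.List.pyRange (max (j - PySem.List.pyGetD (PySem.List.pyGetD b i []) j 0) 0) (min j M) 1).map
              (fun ny => PySem.List.pyGetD (PySem.List.pyGetD b i []) ny 0)).sum
         else 0)
      + (if 0 ≤ j ∧ j < M then
            ((PySem.List.pyRange (max (i + 1) 0) (min (i + PySem.List.pyGetD (PySem.List.pyGetD b i []) j 0 + 1) N) 1).map
              (fun nx => PySem.List.pyGetD (PySem.List.pyGetD b nx []) j 0)).sum
          + ((PySem.List.pyRange (max (i - PySem.List.pyGetD (PySem.List.pyGetD b i []) j 0) 0) (min i N) 1).map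
              (fun nx => PySem.List.pyGetD (PySem.List.pyGetD b nx []) j 0)).sum
         else 0) := by
  unfold get_max_flowers
  dsimp only
  rw [(by decide : PySem.List.pyRange 0 4 1 = [0, 1, 2, 3])]
  simp only [List.foldl_cons, List.foldl_nil]
  rw [(by decide : PySem.List.pyGetD ([0, 1, 0, -1] : List Int) 0 0 = 0),
      (by decide : PySem.List.pyGetD ([0, 1, 0, -1] : List Int) 1 0 = 1),
      (by decide : PySem.List.pyGetD ([0, 1, 0, -1] : List Int) 2 0 = 0),
      (by decide : PySem.List.pyGetD ([0, 1, 0, -1] : List Int) 3 0 = -1),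
      (by decide : PySem.List.pyGetD ([1, 0, -1, 0] : List Int) 0 0 = 1),
      (by decide : PySem.List.pyGetD ([1, 0, -1, 0] : List Int) 1 0 = 0),
      (by decide : PySem.List.pyGetD ([1, 0, -1, 0] : List Int) 2 0 = -1),
      (by decide : PySem.List.pyGetD ([1, 0, -1, 0] : List Int) 3 0 = 0)]
  have h0 : ∀ init : Int, List.foldl (fun tot flower => if 0 ≤ i + 0 * flower ∧ i + 0 * flower < N ∧ 0 ≤ j + 1 * flower ∧ j + 1 * flower < M then tot + PySem.List.pyGetD (PySem.List.pyGetD b (i + 0 * flower) []) (j + 1 * flower) 0 else tot) init (PySem.List.pyRange 1 (PySem.List.pyGetD (PySem.List.pyGetD b i []) j 0 + 1) 1) = init + (if 0 ≤ i ∧ i < N then ((PySem.List.pyRange (max (j + 1) 0) (min (j + PySem.List.pyGetD (PySem.List.pyGetD b i []) j 0 + 1) M) 1).map (fun ny => PySem.List.pyGetD (PySem.List.pyGetD b i []) ny 0)).sum else 0) := by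
    intro init
    by_cases hC : 0 ≤ i ∧ i < N
    · rw [if_pos hC]
      rw [PySem.List.foldl_congr_mem (PySem.List.pyRange 1 (PySem.List.pyGetD (PySem.List.pyGetD b i []) j 0 + 1) 1) _
          (fun tot f => if -j ≤ f ∧ f < M - j then tot + PySem.List.pyGetD (PySem.List.pyGetD b i []) (j + f) 0 else tot) init (by
        intro tot f hf
        rw [PySem.List.mem_pyRange_one] at hf
        rw [show i + 0 * f = i from by ring, show j + 1 * f = j + f from by ring]
        rw [if_congr (show (0 ≤ i ∧ i < N ∧ 0 ≤ j + f ∧ j + f < M) ↔ (-j ≤ f ∧ f < M - j) from by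
          constructor
          · rintro ⟨-, -, h3, h4⟩; exact ⟨by omega, by omega⟩
          · rintro ⟨l, r⟩; exact ⟨hC.1, hC.2, by omega, by omega⟩) rfl rfl])]
      rw [pv_foldl_guard2_sum, pv_sum_guard_clamp2]
      rw [show ((List.map (fun f => PySem.List.pyGetD (PySem.List.pyGetD b i []) (j + f) 0) (PySem.List.pyRange (max 1 (-j)) (min (PySem.List.pyGetD (PySem.List.pyGetD b i []) j 0 + 1) (M - j)) 1)).sum)
            = ((List.map (fun ny => PySem.List.pyGetD (PySem.List.pyGetD b i []) ny 0) (PySem.List.pyRange (j + max 1 (-j)) (j + min (PySem.List.pyGetD (PySem.List.pyGetD b i []) j 0 + 1) (M - j)) 1)).sum)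
          from pv_sum_shift (max 1 (-j)) (min (PySem.List.pyGetD (PySem.List.pyGetD b i []) j 0 + 1) (M - j)) j (fun ny => PySem.List.pyGetD (PySem.List.pyGetD b i []) ny 0)]
      rw [show j + max 1 (-j) = max (j + 1) 0 from by omega,
          show j + min (PySem.List.pyGetD (PySem.List.pyGetD b i []) j 0 + 1) (M - j) = min (j + PySem.List.pyGetD (PySem.List.pyGetD b i []) j 0 + 1) M from by omega]
    · rw [if_neg hC]
      rw [PySem.List.foldl_congr_mem (PySem.List.pyRange 1 (PySem.List.pyGetD (PySem.List.pyGetD b i []) j 0 + 1) 1) _ (fun tot (_ : Int) => tot) init (by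
        intro tot f hf
        rw [if_neg (by omega)])]
      rw [pv_foldl_id]
      omega
  have h1 : ∀ init : Int, List.foldl (fun tot flower => if 0 ≤ i + 1 * flower ∧ i + 1 * flower < N ∧ 0 ≤ j + 0 * flower ∧ j + 0 * flower < M then tot + PySem.List.pyGetD (PySem.List.pyGetD b (i + 1 * flower) []) (j + 0 * flower) 0 else tot) init (PySem.List.pyRange 1 (PySem.List.pyGetD (PySem.List.pyGetD b i []) j 0 + 1) 1) = init + (if 0 ≤ j ∧ j < M then ((PySem.List.pyRange (max (i + 1) 0) (min (i + PySem.List.pyGetD (PySem.List.pyGetD b i []) j 0 + 1) N) 1).map (fun nx => PySem.List.pyGetD (PySem.List.pyGetD b nx []) j 0)).sum else 0) := by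
    intro init
    by_cases hC : 0 ≤ j ∧ j < M
    · rw [if_pos hC]
      rw [PySem.List.foldl_congr_mem (PySem.List.pyRange 1 (PySem.List.pyGetD (PySem.List.pyGetD b i []) j 0 + 1) 1) _
          (fun tot f => if -i ≤ f ∧ f < N - i then tot + PySem.List.pyGetD (PySem.List.pyGetD b (i + f) []) j 0 else tot) init (by
        intro tot f hf
        rw [PySem.List.mem_pyRange_one] at hf
        rw [show i + 1 * f = i + f from by ring, show j + 0 * f = j from by ring]
        rw [if_congr (show (0 ≤ i + f ∧ i + f < N ∧ 0 ≤ j ∧ j < M) ↔ (-i ≤ f ∧ f < N - i) from by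
          constructor
          · rintro ⟨h1, h2, -, -⟩; exact ⟨by omega, by omega⟩
          · rintro ⟨l, r⟩; exact ⟨by omega, by omega, hC.1, hC.2⟩) rfl rfl])]
      rw [pv_foldl_guard2_sum, pv_sum_guard_clamp2]
      rw [show ((List.map (fun f => PySem.List.pyGetD (PySem.List.pyGetD b (i + f) []) j 0) (PySem.List.pyRange (max 1 (-i)) (min (PySem.List.pyGetD (PySem.List.pyGetD b i []) j 0 + 1) (N - i)) 1)).sum)
            = ((List.map (fun nx => PySem.List.pyGetD (PySem.List.pyGetD b nx []) j 0) (PySem.List.pyRange (i + max 1 (-i)) (i + min (PySem.List.pyGetD (PySem.List.pyGetD b i []) j 0 + 1) (N - i)) 1)).sum)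
          from pv_sum_shift (max 1 (-i)) (min (PySem.List.pyGetD (PySem.List.pyGetD b i []) j 0 + 1) (N - i)) i (fun nx => PySem.List.pyGetD (PySem.List.pyGetD b nx []) j 0)]
      rw [show i + max 1 (-i) = max (i + 1) 0 from by omega,
          show i + min (PySem.List.pyGetD (PySem.List.pyGetD b i []) j 0 + 1) (N - i) = min (i + PySem.List.pyGetD (PySem.List.pyGetD b i []) j 0 + 1) N from by omega]
    · rw [if_neg hC]
      rw [PySem.List.foldl_congr_mem (PySem.List.pyRange 1 (PySem.List.pyGetD (PySem.List.pyGetD b i []) j 0 + 1) 1) _ (fun tot (_ : Int) => tot) init (by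
        intro tot f hf
        rw [if_neg (by omega)])]
      rw [pv_foldl_id]
      omega
  have h2 : ∀ init : Int, List.foldl (fun tot flower => if 0 ≤ i + 0 * flower ∧ i + 0 * flower < N ∧ 0 ≤ j + -1 * flower ∧ j + -1 * flower < M then tot + PySem.List.pyGetD (PySem.List.pyGetD b (i + 0 * flower) []) (j + -1 * flower) 0 else tot) init (PySem.List.pyRange 1 (PySem.List.pyGetD (PySem.List.pyGetD b i []) j 0 + 1) 1) = init + (if 0 ≤ i ∧ i < N then ((PySem.List.pyRange (max (j - PySem.List.pyGetD (PySem.List.pyGetD b i []) j 0) 0) (min j M) 1).map (fun ny => PySem.List.pyGetD (PySem.List.pyGetD b i []) ny 0)).sum else 0) := by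
    intro init
    by_cases hC : 0 ≤ i ∧ i < N
    · rw [if_pos hC]
      rw [PySem.List.foldl_congr_mem (PySem.List.pyRange 1 (PySem.List.pyGetD (PySem.List.pyGetD b i []) j 0 + 1) 1) _
          (fun tot f => if j - M + 1 ≤ f ∧ f < j + 1 then tot + PySem.List.pyGetD (PySem.List.pyGetD b i []) (j - f) 0 else tot) init (by
        intro tot f hf
        rw [PySem.List.mem_pyRange_one] at hf
        rw [show i + 0 * f = i from by ring, show j + -1 * f = j - f from by ring]
        rw [if_congr (show (0 ≤ i ∧ i < N ∧ 0 ≤ j - f ∧ j - f < M) ↔ (j - M + 1 ≤ f ∧ f < j + 1) from by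
          constructor
          · rintro ⟨-, -, h3, h4⟩; exact ⟨by omega, by omega⟩
          · rintro ⟨l, r⟩; exact ⟨hC.1, hC.2, by omega, by omega⟩) rfl rfl])]
      rw [pv_foldl_guard2_sum, pv_sum_guard_clamp2]
      rw [show ((List.map (fun f => PySem.List.pyGetD (PySem.List.pyGetD b i []) (j - f) 0) (PySem.List.pyRange (max 1 (j - M + 1)) (min (PySem.List.pyGetD (PySem.List.pyGetD b i []) j 0 + 1) (j + 1)) 1)).sum)
            = ((List.map (fun ny => PySem.List.pyGetD (PySem.List.pyGetD b i []) ny 0) (PySem.List.pyRange (j - min (PySem.List.pyGetD (PySem.List.pyGetD b i []) j 0 + 1) (j + 1) + 1) (j - max 1 (j - M + 1) + 1) 1)).sum)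
          from pv_sum_reflect2 (max 1 (j - M + 1)) (min (PySem.List.pyGetD (PySem.List.pyGetD b i []) j 0 + 1) (j + 1)) j (fun ny => PySem.List.pyGetD (PySem.List.pyGetD b i []) ny 0)]
      rw [show j - min (PySem.List.pyGetD (PySem.List.pyGetD b i []) j 0 + 1) (j + 1) + 1 = max (j - PySem.List.pyGetD (PySem.List.pyGetD b i []) j 0) 0 from by omega,
          show j - max 1 (j - M + 1) + 1 = min j M from by omega]
    · rw [if_neg hC]
      rw [PySem.List.foldl_congr_mem (PySem.List.pyRange 1 (PySem.List.pyGetD (PySem.List.pyGetD b i []) j 0 + 1) 1) _ (fun tot (_ : Int) => tot) init (by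
        intro tot f hf
        rw [if_neg (by omega)])]
      rw [pv_foldl_id]
      omega
  have h3 : ∀ init : Int, List.foldl (fun tot flower => if 0 ≤ i + -1 * flower ∧ i + -1 * flower < N ∧ 0 ≤ j + 0 * flower ∧ j + 0 * flower < M then tot + PySem.List.pyGetD (PySem.List.pyGetD b (i + -1 * flower) []) (j + 0 * flower) 0 else tot) init (PySem.List.pyRange 1 (PySem.List.pyGetD (PySem.List.pyGetD b i []) j 0 + 1) 1) = init + (if 0 ≤ j ∧ j < M then ((PySem.List.pyRange (max (i - PySem.List.pyGetD (PySem.List.pyGetD b i []) j 0) 0) (min i N) 1).map (fun nx => PySem.List.pyGetD (PySem.List.pyGetD b nx []) j 0)).sum else 0) := by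
    intro init
    by_cases hC : 0 ≤ j ∧ j < M
    · rw [if_pos hC]
      rw [PySem.List.foldl_congr_mem (PySem.List.pyRange 1 (PySem.List.pyGetD (PySem.List.pyGetD b i []) j 0 + 1) 1) _
          (fun tot f => if i - N + 1 ≤ f ∧ f < i + 1 then tot + PySem.List.pyGetD (PySem.List.pyGetD b (i - f) []) j 0 else tot) init (by
        intro tot f hf
        rw [PySem.List.mem_pyRange_one] at hf
        rw [show i + -1 * f = i - f from by ring, show j + 0 * f = j from by ring]
        rw [if_congr (show (0 ≤ i - f ∧ i - f < N ∧ 0 ≤ j ∧ j < M) ↔ (i - N + 1 ≤ f ∧ f < i + 1) from by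
          constructor
          · rintro ⟨h1, h2, -, -⟩; exact ⟨by omega, by omega⟩
          · rintro ⟨l, r⟩; exact ⟨by omega, by omega, hC.1, hC.2⟩) rfl rfl])]
      rw [pv_foldl_guard2_sum, pv_sum_guard_clamp2]
      rw [show ((List.map (fun f => PySem.List.pyGetD (PySem.List.pyGetD b (i - f) []) j 0) (PySem.List.pyRange (max 1 (i - N + 1)) (min (PySem.List.pyGetD (PySem.List.pyGetD b i []) j 0 + 1) (i + 1)) 1)).sum)
            = ((List.map (fun nx => PySem.List.pyGetD (PySem.List.pyGetD b nx []) j 0) (PySem.List.pyRange (i - min (PySem.List.pyGetD (PySem.List.pyGetD b i []) j 0 + 1) (i + 1) + 1) (i - max 1 (i - N + 1) + 1) 1)).sum)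
          from pv_sum_reflect2 (max 1 (i - N + 1)) (min (PySem.List.pyGetD (PySem.List.pyGetD b i []) j 0 + 1) (i + 1)) i (fun nx => PySem.List.pyGetD (PySem.List.pyGetD b nx []) j 0)]
      rw [show i - min (PySem.List.pyGetD (PySem.List.pyGetD b i []) j 0 + 1) (i + 1) + 1 = max (i - PySem.List.pyGetD (PySem.List.pyGetD b i []) j 0) 0 from by omega,
          show i - max 1 (i - N + 1) + 1 = min i N from by omega]
    · rw [if_neg hC]
      rw [PySem.List.foldl_congr_mem (PySem.List.pyRange 1 (PySem.List.pyGetD (PySem.List.pyGetD b i []) j 0 + 1) 1) _ (fun tot (_ : Int) => tot) init (by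
        intro tot f hf
        rw [if_neg (by omega)])]
      rw [pv_foldl_id]
      omega
  rw [h0, h1, h2, h3]
  by_cases hI : 0 ≤ i ∧ i < N
  · by_cases hJ : 0 ≤ j ∧ j < M
    · simp only [if_pos hI, if_pos hJ]; ring
    · simp only [if_pos hI, if_neg hJ]; ring
  · by_cases hJ : 0 ≤ j ∧ j < M
    · simp only [if_neg hI, if_pos hJ]; ring
    · simp only [if_neg hI, if_neg hJ]; ring

-- the B side: under Pre_, the grid scan evaluates to the same four clamped range sums
-- splitting the cross guard into a disjoint row part and column part (pointwise)
theorem pv_guard_split (r c i j N M K v : Int) :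
    (if r < N ∧ c < M ∧ ((r = i ∧ c ≠ j ∧ |c - j| ≤ K) ∨ (c = j ∧ r ≠ i ∧ |r - i| ≤ K)) then v else 0)
      = (if r = i then (if r < N ∧ c < M ∧ c ≠ j ∧ |c - j| ≤ K then v else 0) else 0)
      + (if c = j then (if r < N ∧ j < M ∧ r ≠ i ∧ |r - i| ≤ K then v else 0) else 0) := by
  simp only [abs_le]
  split_ifs <;> omega

-- the row guard splits into the right and left intervals
theorem pv_row_guard_split (c j M K v : Int) :
    (if c < M ∧ c ≠ j ∧ |c - j| ≤ K then v else 0)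
      = (if j + 1 ≤ c ∧ c < min (j + K + 1) M then v else 0)
      + (if j - K ≤ c ∧ c < min j M then v else 0) := by
  simp only [abs_le]
  split_ifs <;> omega

-- the column guard splits into the down and up intervals
theorem pv_col_guard_split (r i N K v : Int) :
    (if r < N ∧ r ≠ i ∧ |r - i| ≤ K then v else 0)
      = (if i + 1 ≤ r ∧ r < min (i + K + 1) N then v else 0)
      + (if i - K ≤ r ∧ r < min i N then v else 0) := by
  simp only [abs_le]
  split_ifs <;> omega

theorem pv_B_eq (i j N M : Int) (b : List (List Int)) (hP : Pre_get_max_flowers i j N M b) :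
    get_max_flowers_alt i j N M b =
      PySem.List.pyGetD (PySem.List.pyGetD b i []) j 0
      + (if 0 ≤ i ∧ i < N then
            ((PySem.List.pyRange (max (j + 1) 0) (min (j + PySem.List.pyGetD (PySem.List.pyGetD b i []) j 0 + 1) M) 1).map
              (fun ny => PySem.List.pyGetD (PySem.List.pyGetD b i []) ny 0)).sum
          + ((PySem.List.pyRange (max (j - PySem.List.pyGetD (PySem.List.pyGetD b i []) j 0) 0) (min j M) 1).map
              (fun ny => PySem.List.pyGetD (PySem.List.pyGetD b i []) ny 0)).sum
         else 0)
      + (if 0 ≤ j ∧ j < M then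
            ((PySem.List.pyRange (max (i + 1) 0) (min (i + PySem.List.pyGetD (PySem.List.pyGetD b i []) j 0 + 1) N) 1).map
              (fun nx => PySem.List.pyGetD (PySem.List.pyGetD b nx []) j 0)).sum
          + ((PySem.List.pyRange (max (i - PySem.List.pyGetD (PySem.List.pyGetD b i []) j 0) 0) (min i N) 1).map
              (fun nx => PySem.List.pyGetD (PySem.List.pyGetD b nx []) j 0)).sum
         else 0) := by
  obtain ⟨hi, hj, hrow, hcol⟩ := hP
  unfold get_max_flowers_alt
  dsimp only
  rw [PySem.List.enumerate_eq_map_pyRange b [], List.foldl_map]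
  dsimp only
  set K := PySem.List.pyGetD (PySem.List.pyGetD b i []) j 0 with hK
  rw [PySem.List.foldl_congr_mem _ _
      (fun total r => total +
        ((PySem.List.pyRange 0 (PySem.List.len (PySem.List.pyGetD b r []))).map
          (fun c => if r < N ∧ c < M ∧ ((r = i ∧ c ≠ j ∧ |c - j| ≤ K) ∨ (c = j ∧ r ≠ i ∧ |r - i| ≤ K)) then PySem.List.pyGetD (PySem.List.pyGetD b r []) c 0 else 0)).sum)
      _ (by
        intro total r hr
        dsimp only
        rw [PySem.List.enumerate_eq_map_pyRange (PySem.List.pyGetD b r []) 0, List.foldl_map]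
        dsimp only
        exact pv_foldl_guard_sum _ _ _ _)]
  rw [PySem.List.foldl_add]
  rw [List.map_congr_left (g := fun r =>
        ((PySem.List.pyRange 0 (PySem.List.len (PySem.List.pyGetD b r []))).map
          (fun c => if r = i then (if r < N ∧ c < M ∧ c ≠ j ∧ |c - j| ≤ K then PySem.List.pyGetD (PySem.List.pyGetD b r []) c 0 else 0) else 0)).sum
      + ((PySem.List.pyRange 0 (PySem.List.len (PySem.List.pyGetD b r []))).map
          (fun c => if c = j then (if r < N ∧ j < M ∧ r ≠ i ∧ |r - i| ≤ K then PySem.List.pyGetD (PySem.List.pyGetD b r []) c 0 else 0) else 0)).sum)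
      (by
        intro r _
        dsimp only
        rw [← PySem.List.sum_map_add_int]
        exact congrArg _ (List.map_congr_left (fun c _ => pv_guard_split r c i j N M K _)))]
  rw [PySem.List.sum_map_add_int]
  have hR : (List.map
            (fun r =>
              (List.map
                  (fun c =>
                    if r = i then
                      if r < N ∧ c < M ∧ c ≠ j ∧ |c - j| ≤ K then PySem.List.pyGetD (PySem.List.pyGetD b r []) c 0
                      else 0
                    else 0)
                  (PySem.List.pyRange 0 (PySem.List.len (PySem.List.pyGetD b r [])))).sum)
            (PySem.List.pyRange 0 (PySem.List.len b))).sum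
      = (if 0 ≤ i ∧ i < N then
            ((PySem.List.pyRange (max (j + 1) 0) (min (j + K + 1) M) 1).map
              (fun ny => PySem.List.pyGetD (PySem.List.pyGetD b i []) ny 0)).sum
          + ((PySem.List.pyRange (max (j - K) 0) (min j M) 1).map
              (fun ny => PySem.List.pyGetD (PySem.List.pyGetD b i []) ny 0)).sum
         else 0) := by
    rw [List.map_congr_left (g := fun r => if r = i then
          ((PySem.List.pyRange 0 (PySem.List.len (PySem.List.pyGetD b r []))).map
            (fun c => if r < N ∧ c < M ∧ c ≠ j ∧ |c - j| ≤ K then PySem.List.pyGetD (PySem.List.pyGetD b r []) c 0 else 0)).sum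
          else 0)
        (fun r _ => pv_sum_if_pull (r = i) _ _)]
    rw [pv_sum_singleton (PySem.List.len b) i _]
    simp only [PySem.List.len_eq]
    by_cases hiN : 0 ≤ i ∧ i < N
    · rw [if_pos (show 0 ≤ i ∧ i < (b.length : Int) from ⟨hiN.1, hi.2⟩), if_pos hiN]
      rw [List.map_congr_left (g := fun c =>
            (if j + 1 ≤ c ∧ c < min (j + K + 1) M then PySem.List.pyGetD (PySem.List.pyGetD b i []) c 0 else 0)
          + (if j - K ≤ c ∧ c < min j M then PySem.List.pyGetD (PySem.List.pyGetD b i []) c 0 else 0))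
          (by
            intro c _
            rw [if_congr (show (i < N ∧ c < M ∧ c ≠ j ∧ |c - j| ≤ K) ↔ (c < M ∧ c ≠ j ∧ |c - j| ≤ K) from
                  ⟨fun h => h.2, fun h => ⟨hiN.2, h⟩⟩) rfl rfl]
            exact pv_row_guard_split c j M K _)]
      rw [PySem.List.sum_map_add_int]
      rw [pv_sum_guard_clamp2, pv_sum_guard_clamp2]
      rw [show max 0 (j + 1) = max (j + 1) 0 from by omega,
          show max 0 (j - K) = max (j - K) 0 from by omega]
      rw [pv_range_collapse _ _ _ (hrow hiN).1, pv_range_collapse _ _ _ (hrow hiN).2]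
    · rw [if_neg hiN]
      by_cases h0 : 0 ≤ i ∧ i < (b.length : Int)
      · rw [if_pos h0, List.map_congr_left (g := fun _ => (0 : Int)) (by
            intro c _
            exact if_neg (fun hcon => absurd hcon.1 (by omega)))]
        simp
      · rw [if_neg h0]
  have hC : (List.map
            (fun r =>
              (List.map
                  (fun c =>
                    if c = j then
                      if r < N ∧ j < M ∧ r ≠ i ∧ |r - i| ≤ K then PySem.List.pyGetD (PySem.List.pyGetD b r []) c 0
                      else 0
                    else 0)
                  (PySem.List.pyRange 0 (PySem.List.len (PySem.List.pyGetD b r [])))).sum)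
            (PySem.List.pyRange 0 (PySem.List.len b))).sum
      = (if 0 ≤ j ∧ j < M then
            ((PySem.List.pyRange (max (i + 1) 0) (min (i + K + 1) N) 1).map
              (fun nx => PySem.List.pyGetD (PySem.List.pyGetD b nx []) j 0)).sum
          + ((PySem.List.pyRange (max (i - K) 0) (min i N) 1).map
              (fun nx => PySem.List.pyGetD (PySem.List.pyGetD b nx []) j 0)).sum
         else 0) := by
    rw [List.map_congr_left (g := fun r => if 0 ≤ j ∧ j < PySem.List.len (PySem.List.pyGetD b r []) then
          (if r < N ∧ j < M ∧ r ≠ i ∧ |r - i| ≤ K then PySem.List.pyGetD (PySem.List.pyGetD b r []) j 0 else 0) else 0)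
        (fun r _ => pv_sum_singleton (PySem.List.len (PySem.List.pyGetD b r [])) j _)]
    by_cases hjM : 0 ≤ j ∧ j < M
    · rw [if_pos hjM]
      rw [List.map_congr_left (g := fun r =>
            (if i + 1 ≤ r ∧ r < min (i + K + 1) N then
               (if 0 ≤ j ∧ j < PySem.List.len (PySem.List.pyGetD b r []) then PySem.List.pyGetD (PySem.List.pyGetD b r []) j 0 else 0) else 0)
          + (if i - K ≤ r ∧ r < min i N then
               (if 0 ≤ j ∧ j < PySem.List.len (PySem.List.pyGetD b r []) then PySem.List.pyGetD (PySem.List.pyGetD b r []) j 0 else 0) else 0))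
          (by
            intro r _
            dsimp only
            by_cases hPr : 0 ≤ j ∧ j < PySem.List.len (PySem.List.pyGetD b r [])
            · rw [if_pos hPr, if_pos hPr]
              rw [if_congr (show (r < N ∧ j < M ∧ r ≠ i ∧ |r - i| ≤ K) ↔ (r < N ∧ r ≠ i ∧ |r - i| ≤ K) from
                    ⟨fun h => ⟨h.1, h.2.2⟩, fun h => ⟨h.1, hjM.2, h.2⟩⟩) rfl rfl]
              exact pv_col_guard_split r i N K _
            · rw [if_neg hPr, if_neg hPr]
              simp)]
      rw [PySem.List.sum_map_add_int]
      rw [pv_sum_guard_clamp2, pv_sum_guard_clamp2]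
      rw [show max 0 (i + 1) = max (i + 1) 0 from by omega,
          show max 0 (i - K) = max (i - K) 0 from by omega]
      simp only [PySem.List.len_eq]
      rw [pv_range_collapse _ _ _ (fun t ht => ((hcol hjM).1 t ht).1),
          pv_range_collapse _ _ _ (fun t ht => ((hcol hjM).2 t ht).1)]
      refine congrArg₂ (· + ·) (congrArg List.sum (List.map_congr_left ?_)) (congrArg List.sum (List.map_congr_left ?_))
      · intro t ht
        exact if_pos ⟨hjM.1, ((hcol hjM).1 t ht).2⟩
      · intro t ht
        exact if_pos ⟨hjM.1, ((hcol hjM).2 t ht).2⟩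
    · rw [if_neg hjM]
      rw [List.map_congr_left (g := fun _ => (0 : Int)) (by
          intro r _
          by_cases hPr : 0 ≤ j ∧ j < PySem.List.len (PySem.List.pyGetD b r [])
          · rw [if_pos hPr, if_neg (fun hcon => absurd hcon.2.1 (fun hjm => hjM ⟨hPr.1, hjm⟩))]
          · rw [if_neg hPr])]
      simp
  rw [hR, hC]
  ring

-- the main equivalence: the two ports agree on every input satisfying Pre_
theorem pv_main (i j N M : Int) (b : List (List Int)) (hP : Pre_get_max_flowers i j N M b) :
    get_max_flowers i j N M b = get_max_flowers_alt i j N M b := by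
  rw [pv_A_eq, pv_B_eq i j N M b hP]

-- ===== VERDICT (by name: the statement is the Claim_ definition above) =====
theorem get_max_flowers_spec : Claim_equal_get_max_flowers := by
  intro i j N M balloons _ hP
  unfold Spec_get_max_flowers
  exact pv_main i j N M balloons hP
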